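-- pv_equiv track=rewrite | github.com/pypi-data/pypi-mirror-60 | packages/windy-crawler/windy-crawler-0.25.tar.gz/windy-crawler-0.25/windy_crawler/windy_web_crawler.py | get_hour_wise_data
-- ===== SOURCE A (Python) =====
-- def get_hour_wise_data(hours, temperatures, winds):
--     """
--     Parameters : Unsorted Hour, Temperature and wind
--     Action : Sort received data based on hour of the day
--     output : Sorted data based on hour of the day
--     """
--
--     total_hours = []
--     daily_hour = []
--
--     total_temperature = []
--     daily_temperature = []
--
--     total_wind = []
--     daily_wind = []
--
--     for hour, temperature, wind in zip(hours, temperatures, winds):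
--
--         if str(hour).startswith("0AM"):
--
--             total_hours.append(daily_hour)
--             daily_hour = []
--             daily_hour.append(str(hour))
--
--             total_temperature.append(daily_temperature)
--             daily_temperature = []
--             daily_temperature.append(str(temperature))
--
--             total_wind.append(daily_wind)
--             daily_wind = []
--             daily_wind.append(str(wind))
--         else:
--
--             daily_hour.append(str(hour))
--             daily_temperature.append(str(temperature))
--             daily_wind.append(str(wind))
--
--     total_hours.append(daily_hour)
--     total_temperature.append(daily_temperature)
--     total_wind.append(daily_wind)
--
--     return total_hours, total_temperature, total_wind
-- ===== SOURCE B (Python) =====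
-- def get_hour_wise_data(hours, temperatures, winds):
--     triples = [(str(h), str(t), str(w)) for h, t, w in zip(hours, temperatures, winds)]
--     cuts = [i for i, (h, _, _) in enumerate(triples) if h.startswith("0AM")]
--     points = [0] + cuts + [len(triples)]
--     groups = [triples[a:b] for a, b in zip(points, points[1:])]
--     return ([[h for h, _, _ in g] for g in groups],
--             [[t for _, t, _ in g] for g in groups],
--             [[w for _, _, w in g] for g in groups])
-- ===== Notes on version B (the rewrite author's own statement) =====
-- stated objective: alternative
-- what changed: Replaces A's single loop carrying six running accumulators by a zip-enumerate-slice pipeline: build the converted triples, collect the indices where the hour starts with '0AM', and slice the triple list between consecutive split points, unzipping each slice back into the three parallel group lists.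
import Mathlib
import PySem

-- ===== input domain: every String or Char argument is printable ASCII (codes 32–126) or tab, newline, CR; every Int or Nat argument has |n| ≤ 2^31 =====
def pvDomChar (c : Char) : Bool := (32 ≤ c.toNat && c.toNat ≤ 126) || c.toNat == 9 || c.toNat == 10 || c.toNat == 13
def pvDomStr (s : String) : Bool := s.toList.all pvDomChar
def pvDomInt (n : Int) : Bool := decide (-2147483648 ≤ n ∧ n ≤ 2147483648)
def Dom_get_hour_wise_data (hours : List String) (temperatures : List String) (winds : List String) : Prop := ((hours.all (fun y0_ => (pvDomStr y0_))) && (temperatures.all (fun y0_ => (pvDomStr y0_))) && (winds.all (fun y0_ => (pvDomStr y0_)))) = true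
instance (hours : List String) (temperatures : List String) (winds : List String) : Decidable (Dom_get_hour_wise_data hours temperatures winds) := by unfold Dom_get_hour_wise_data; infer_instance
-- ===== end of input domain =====

-- B replaces A's six running accumulators by one pass that collects the '0AM' boundary
-- indices and slices the zipped triples between consecutive split points (alternative
-- decomposition, same O(n) cost). str() on the String inputs is the identity and is
-- dropped in both ports.

-- ===== PORT A =====
-- the for-loop over zip(hours, temperatures, winds) with its six accumulators
def pvLoopA : List (String × String × String) → List (List String) → List String →
    List (List String) → List String → List (List String) → List String →
    List (List String) × List (List String) × List (List String)
  | [], th, dh, tt, dt, tw, dw => (th ++ [dh], tt ++ [dt], tw ++ [dw])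
  | (h, t, w) :: rest, th, dh, tt, dt, tw, dw =>
    if PySem.Str.startswith h "0AM" then
      pvLoopA rest (th ++ [dh]) [h] (tt ++ [dt]) [t] (tw ++ [dw]) [w]
    else
      pvLoopA rest th (dh ++ [h]) tt (dt ++ [t]) tw (dw ++ [w])

def get_hour_wise_data (hours : List String) (temperatures : List String) (winds : List String) : List (List String) × List (List String) × List (List String) :=
  pvLoopA (hours.zip (temperatures.zip winds)) [] [] [] [] [] []

-- ===== PORT B =====
def get_hour_wise_data_alt (hours : List String) (temperatures : List String) (winds : List String) : List (List String) × List (List String) × List (List String) :=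
  let triples := hours.zip (temperatures.zip winds)
  let cuts := ((PySem.List.enumerate triples).filter (fun p => PySem.Str.startswith p.2.1 "0AM")).map (·.1)
  let points := 0 :: cuts ++ [(triples.length : Int)]
  let groups := (points.zip points.tail).map (fun p => PySem.List.slice triples (some p.1) (some p.2))
  (groups.map (fun g => g.map (·.1)),
   groups.map (fun g => g.map (·.2.1)),
   groups.map (fun g => g.map (·.2.2)))

-- ===== PRECONDITION & SPEC =====
def Spec_get_hour_wise_data (hours : List String) (temperatures : List String) (winds : List String) (out : List (List String) × List (List String) × List (List String)) : Prop := out = get_hour_wise_data_alt hours temperatures winds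
instance (hours : List String) (temperatures : List String) (winds : List String) (out : List (List String) × List (List String) × List (List String)) : Decidable (Spec_get_hour_wise_data hours temperatures winds out) := by unfold Spec_get_hour_wise_data; infer_instance

-- ===== CLAIM (what is proved, stated in full; the proofs are below) =====
def Claim_equal_get_hour_wise_data : Prop := ∀ (hours : List String) (temperatures : List String) (winds : List String), Dom_get_hour_wise_data hours temperatures winds → Spec_get_hour_wise_data hours temperatures winds (get_hour_wise_data hours temperatures winds)

-- ===== LEMMAS AND PROOFS =====

-- the common reference decomposition: first (open) group and the remaining groups
def pvGroups : List (String × String × String) → List (String × String × String) × List (List (String × String × String))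
  | [] => ([], [])
  | x :: xs =>
    let (g, gs) := pvGroups xs
    if PySem.Str.startswith x.1 "0AM" then ([], (x :: g) :: gs) else (x :: g, gs)

theorem pvLoopA_char (xs : List (String × String × String)) :
    ∀ th dh tt dt tw dw, pvLoopA xs th dh tt dt tw dw =
      (th ++ (dh ++ (pvGroups xs).1.map (·.1)) :: (pvGroups xs).2.map (fun g => g.map (·.1)),
       tt ++ (dt ++ (pvGroups xs).1.map (·.2.1)) :: (pvGroups xs).2.map (fun g => g.map (·.2.1)),
       tw ++ (dw ++ (pvGroups xs).1.map (·.2.2)) :: (pvGroups xs).2.map (fun g => g.map (·.2.2))) := by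
  induction xs with
  | nil => intro th dh tt dt tw dw; simp [pvLoopA, pvGroups]
  | cons x xs ih =>
    intro th dh tt dt tw dw
    obtain ⟨h, t, w⟩ := x
    by_cases hb : PySem.Chars.startswith h.toList ['0', 'A', 'M'] = true <;>
      simp [pvLoopA, pvGroups, hb, ih]

def pvCutsAux (s : Int) (xs : List (String × String × String)) : List Int :=
  ((PySem.List.enumerate xs s).filter (fun p => PySem.Str.startswith p.2.1 "0AM")).map (·.1)

def pvCuts (xs : List (String × String × String)) : List Int := pvCutsAux 0 xs

theorem pvCutsAux_cons (s : Int) (x : String × String × String) (xs : List (String × String × String)) :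
    pvCutsAux s (x :: xs) = (if PySem.Str.startswith x.1 "0AM" then [s] else []) ++ pvCutsAux (s + 1) xs := by
  by_cases hb : PySem.Chars.startswith x.1.toList ['0', 'A', 'M'] = true <;>
    simp [pvCutsAux, PySem.List.enumerate_cons, hb]

theorem pvCutsAux_shift (xs : List (String × String × String)) :
    ∀ s, pvCutsAux s xs = (pvCutsAux 0 xs).map (· + s) := by
  induction xs with
  | nil => intro s; simp [pvCutsAux]
  | cons x xs ih =>
    intro s
    rw [pvCutsAux_cons, pvCutsAux_cons]
    simp only [zero_add]
    rw [ih (s + 1), ih 1]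
    by_cases hb : PySem.Chars.startswith x.1.toList ['0', 'A', 'M'] = true <;>
      simp [hb, List.map_map] <;>
      · intro a _; ring

theorem pvCuts_cons (x : String × String × String) (xs : List (String × String × String)) :
    pvCuts (x :: xs) = (if PySem.Str.startswith x.1 "0AM" then [(0:Int)] else []) ++ (pvCuts xs).map (· + 1) := by
  show pvCutsAux 0 (x :: xs) = _
  rw [pvCutsAux_cons]
  simp only [zero_add]
  rw [pvCutsAux_shift xs 1]
  rfl

theorem pvCuts_nonneg (xs : List (String × String × String)) :
    ∀ c ∈ pvCuts xs, 0 ≤ c := by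
  induction xs with
  | nil => intro c hc; simp [pvCuts, pvCutsAux] at hc
  | cons x xs ih =>
    intro c hc
    rw [pvCuts_cons] at hc
    rcases List.mem_append.mp hc with hc | hc
    · split at hc <;> simp_all
    · obtain ⟨a, ha, rfl⟩ := List.mem_map.mp hc
      have := ih a ha; omega

def pvPairs (l : List Int) : List (Int × Int) := l.zip l.tail

theorem pvPairs_map_add_one (l : List Int) :
    pvPairs (l.map (· + 1)) = (pvPairs l).map (fun p => (p.1 + 1, p.2 + 1)) := by
  cases l with
  | nil => rfl
  | cons a l =>
    show ((a :: l).map (· + 1)).zip (((a :: l).map (· + 1)).tail) = _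
    rw [show (((a :: l).map (· + 1)).tail) = l.map (· + 1) from rfl, List.zip_map]
    exact List.map_congr_left fun p _ => rfl

theorem pvPairs_nonneg (l : List Int) (hl : ∀ c ∈ l, 0 ≤ c) :
    ∀ p ∈ pvPairs l, 0 ≤ p.1 ∧ 0 ≤ p.2 := by
  intro p hp
  obtain ⟨h1, h2⟩ := List.of_mem_zip hp
  exact ⟨hl _ h1, hl _ (List.mem_of_mem_tail h2)⟩

theorem slice_succ_succ (x : String × String × String) (xs : List (String × String × String))
    (a b : Int) (ha : 0 ≤ a) (hb : 0 ≤ b) :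
    PySem.List.slice (x :: xs) (some (a + 1)) (some (b + 1)) = PySem.List.slice xs (some a) (some b) := by
  rw [PySem.List.slice_toNat _ (by omega) (by omega), PySem.List.slice_toNat _ ha hb]
  have h1 : (a + 1).toNat = a.toNat + 1 := by omega
  have h2 : (b + 1).toNat = b.toNat + 1 := by omega
  simp [h1, h2]

theorem slice_zero_succ (x : String × String × String) (xs : List (String × String × String))
    (b : Int) (hb : 0 ≤ b) :
    PySem.List.slice (x :: xs) (some 0) (some (b + 1)) = x :: PySem.List.slice xs (some 0) (some b) := by
  rw [PySem.List.slice_toNat _ (by omega) (by omega), PySem.List.slice_toNat _ (by omega) hb]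
  have h2 : (b + 1).toNat = b.toNat + 1 := by omega
  simp [h2]

def pvGroupsB (xs : List (String × String × String)) : List (List (String × String × String)) :=
  (pvPairs (0 :: pvCuts xs ++ [(xs.length : Int)])).map (fun p => PySem.List.slice xs (some p.1) (some p.2))

theorem pvGroupsB_eq (xs : List (String × String × String)) :
    pvGroupsB xs = (pvGroups xs).1 :: (pvGroups xs).2 := by
  induction xs with
  | nil => decide
  | cons x xs ih =>
    have hLnn : ∀ c ∈ pvCuts xs ++ [(xs.length : Int)], 0 ≤ c := by
      intro c hc
      rcases List.mem_append.mp hc with h | h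
      · exact pvCuts_nonneg xs _ h
      · simp at h; omega
    have hshift : (pvPairs ((pvCuts xs ++ [(xs.length : Int)]).map (· + 1))).map
          (fun p => PySem.List.slice (x :: xs) (some p.1) (some p.2))
        = (pvPairs (pvCuts xs ++ [(xs.length : Int)])).map
          (fun p => PySem.List.slice xs (some p.1) (some p.2)) := by
      rw [pvPairs_map_add_one, List.map_map]
      apply List.map_congr_left
      intro p hp
      obtain ⟨h1, h2⟩ := pvPairs_nonneg _ hLnn p hp
      exact slice_succ_succ x xs p.1 p.2 h1 h2
    obtain ⟨l0, L', hL⟩ : ∃ l0 L', pvCuts xs ++ [(xs.length : Int)] = l0 :: L' := by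
      cases h : pvCuts xs ++ [(xs.length : Int)] with
      | nil => exact absurd h (by simp)
      | cons a b => exact ⟨a, b, rfl⟩
    have hl0 : 0 ≤ l0 := hLnn l0 (by rw [hL]; exact List.mem_cons_self ..)
    have hM : (pvCuts xs ++ [(xs.length : Int)]).map (· + 1) = (l0 + 1) :: L'.map (· + 1) := by
      rw [hL]; rfl
    have hpairsM : pvPairs ((pvCuts xs ++ [(xs.length : Int)]).map (· + 1))
        = ((l0 + 1) :: L'.map (· + 1)).zip (L'.map (· + 1)) := by
      rw [pvPairs, hM]; rfl
    have hBxs : pvGroupsB xs = PySem.List.slice xs (some 0) (some l0) ::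
        (pvPairs (pvCuts xs ++ [(xs.length : Int)])).map (fun p => PySem.List.slice xs (some p.1) (some p.2)) := by
      simp only [pvGroupsB, pvPairs, List.cons_append, hL, List.tail_cons, List.zip_cons_cons, List.map_cons]
    have hBx := hBxs.symm.trans ih
    injection hBx with e1 e2
    have hlen : ((x :: xs).length : Int) = (xs.length : Int) + 1 := by
      simp
    have hmap1 : (pvCuts xs).map (· + 1) ++ [((x :: xs).length : Int)] = (l0 + 1) :: L'.map (· + 1) := by
      rw [hlen, ← hM, List.map_append]
      rfl
    have h00 : PySem.List.slice (x :: xs) (some 0) (some 0) = ([] : List (String × String × String)) := by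
      rw [PySem.List.slice_toNat _ (by omega) (by omega)]; simp
    by_cases hb : PySem.Str.startswith x.1 "0AM" = true
    · -- boundary: a new empty first group, x starts the second
      have hb' : PySem.Chars.startswith x.1.toList ['0', 'A', 'M'] = true := by simpa using hb
      have hpts : (0 : Int) :: pvCuts (x :: xs) ++ [((x :: xs).length : Int)]
          = 0 :: 0 :: (l0 + 1) :: L'.map (· + 1) := by
        rw [pvCuts_cons, if_pos hb]
        simp only [List.cons_append, List.nil_append]
        rw [hmap1]
      have hexp : pvGroupsB (x :: xs)
          = PySem.List.slice (x :: xs) (some 0) (some 0)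
            :: PySem.List.slice (x :: xs) (some 0) (some (l0 + 1))
            :: (pvPairs ((pvCuts xs ++ [(xs.length : Int)]).map (· + 1))).map
                 (fun p => PySem.List.slice (x :: xs) (some p.1) (some p.2)) := by
        rw [pvGroupsB, hpts, hpairsM]
        rfl
      rw [hexp, hshift, slice_zero_succ x xs l0 hl0, h00, e1, e2]
      simp [pvGroups, hb']
    · have hb' : ¬ PySem.Chars.startswith x.1.toList ['0', 'A', 'M'] = true := by simpa using hb
      have hpts : (0 : Int) :: pvCuts (x :: xs) ++ [((x :: xs).length : Int)]
          = 0 :: (l0 + 1) :: L'.map (· + 1) := by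
        rw [pvCuts_cons, if_neg hb]
        simp only [List.cons_append, List.nil_append]
        rw [hmap1]
      have hexp : pvGroupsB (x :: xs)
          = PySem.List.slice (x :: xs) (some 0) (some (l0 + 1))
            :: (pvPairs ((pvCuts xs ++ [(xs.length : Int)]).map (· + 1))).map
                 (fun p => PySem.List.slice (x :: xs) (some p.1) (some p.2)) := by
        rw [pvGroupsB, hpts, hpairsM]
        rfl
      rw [hexp, hshift, slice_zero_succ x xs l0 hl0, e1, e2]
      simp [pvGroups, hb']

theorem alt_char (hours temperatures winds : List String) :
    get_hour_wise_data_alt hours temperatures winds =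
      (((pvGroups (hours.zip (temperatures.zip winds))).1 :: (pvGroups (hours.zip (temperatures.zip winds))).2).map (fun g => g.map (·.1)),
       ((pvGroups (hours.zip (temperatures.zip winds))).1 :: (pvGroups (hours.zip (temperatures.zip winds))).2).map (fun g => g.map (·.2.1)),
       ((pvGroups (hours.zip (temperatures.zip winds))).1 :: (pvGroups (hours.zip (temperatures.zip winds))).2).map (fun g => g.map (·.2.2))) := by
  have h : get_hour_wise_data_alt hours temperatures winds =
      ((pvGroupsB (hours.zip (temperatures.zip winds))).map (fun g => g.map (·.1)),
       (pvGroupsB (hours.zip (temperatures.zip winds))).map (fun g => g.map (·.2.1)),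
       (pvGroupsB (hours.zip (temperatures.zip winds))).map (fun g => g.map (·.2.2))) := rfl
  rw [h, pvGroupsB_eq]

-- ===== VERDICT (by name: the statement is the Claim_ definition above) =====
theorem get_hour_wise_data_spec : Claim_equal_get_hour_wise_data := by
  intro hours temperatures winds _
  show get_hour_wise_data hours temperatures winds = get_hour_wise_data_alt hours temperatures winds
  rw [get_hour_wise_data, pvLoopA_char, alt_char]
  simp
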